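-- pv_equiv track=rewrite | github.com/Gr1zzlyBear7/EGE | Ульяна/23/3.py | f
-- ===== SOURCE A (Python) =====
-- def f(x, y):
--     if x > y or x == 21:
--         return 0
--     if x == y:
--         return 1
--     if x % 2 == 0:
--         return f(x + 1, y) + f(x + 4, y) + f(x + x + 2, y)
--     return f(x + 1, y) + f(x + 4, y) + f(x + x + 1, y)
-- ===== SOURCE B (Python) =====
-- def f(x, y):
--     # Bottom-up DP: tabulate the count for every state from y down to x.
--     if x > y or x == 21:
--         return 0
--     if x == y:
--         return 1
--     dp = []  # after processing v, dp[i] is the count for state y - i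
--     for v in range(y, x - 1, -1):
--         if v == 21:
--             c = 0
--         elif v == y:
--             c = 1
--         else:
--             t = v + v + 2 if v % 2 == 0 else v + v + 1
--             c = dp[y - v - 1]
--             if v + 4 <= y:
--                 c += dp[y - v - 4]
--             if t <= y:
--                 c += dp[y - t]
--         dp.append(c)
--     return dp[y - x]
-- ===== Notes on version B (the rewrite author's own statement) =====
-- stated objective: alternative
-- what changed: Replaced A's three-way branching recursion with a single bottom-up dynamic-programming pass that tabulates the count for every state from y down to x in a list.
import Mathlib
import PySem

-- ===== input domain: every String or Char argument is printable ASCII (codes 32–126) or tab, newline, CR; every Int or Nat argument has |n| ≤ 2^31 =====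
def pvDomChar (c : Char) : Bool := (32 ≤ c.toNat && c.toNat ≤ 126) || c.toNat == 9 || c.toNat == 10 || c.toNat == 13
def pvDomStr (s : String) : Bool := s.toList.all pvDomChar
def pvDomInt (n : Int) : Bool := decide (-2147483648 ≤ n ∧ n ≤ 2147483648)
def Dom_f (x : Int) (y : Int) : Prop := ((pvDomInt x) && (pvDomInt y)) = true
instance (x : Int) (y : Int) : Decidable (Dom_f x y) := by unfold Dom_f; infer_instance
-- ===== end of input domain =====

-- B computes the count by a bottom-up DP pass tabulating the states y..x instead of A's three-way recursion (return value only).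

-- ===== PORT A =====
-- A is a recursive Python function; the port uses fuel.  On 0 ≤ x every recursive
-- call strictly increases x, so fuel (y - x).toNat + 1 is enough there; for x < 0 the
-- Python either answers without recursing (x > y or x = y, fuel 1 suffices) or
-- descends forever (RecursionError, excluded by Pre_f), so fuel 1 is used.
def fAux : Nat → Int → Int → Int
  | 0, _, _ => 0
  | n + 1, x, y =>
    if x > y ∨ x = 21 then 0
    else if x = y then 1
    else if PySem.Int.mod x 2 = 0 then
      fAux n (x + 1) y + fAux n (x + 4) y + fAux n (x + x + 2) y
    else
      fAux n (x + 1) y + fAux n (x + 4) y + fAux n (x + x + 1) y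

def f (x : Int) (y : Int) : Int := fAux (if 0 ≤ x then (y - x).toNat + 1 else 1) x y

-- ===== PORT B =====
-- Python's dp is a list used with append and O(1) in-range indexing; it is ported as
-- an Array.  Every index B reads is nonnegative and in range on the admitted inputs
-- (B guards v + 4 ≤ y and t ≤ y before reading), so .toNat/getD is exact there.
def fBStep (y : Int) (dp : Array Int) (v : Int) : Array Int :=
  if v = 21 then dp.push 0
  else if v = y then dp.push 1
  else
    let t := if PySem.Int.mod v 2 = 0 then v + v + 2 else v + v + 1
    let c := dp.getD (y - v - 1).toNat 0
    let c := if v + 4 ≤ y then c + dp.getD (y - v - 4).toNat 0 else c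
    let c := if t ≤ y then c + dp.getD (y - t).toNat 0 else c
    dp.push c

def f_alt (x : Int) (y : Int) : Int :=
  if x > y ∨ x = 21 then 0
  else if x = y then 1
  else
    let dp := (PySem.List.pyRange y (x - 1) (-1)).foldl (fBStep y) #[]
    dp.getD (y - x).toNat 0

-- ===== PRECONDITION & SPEC =====
-- Pre_f is exactly where the Python A terminates: for x < 0 with x < y the call
-- f(x+x+1, y) (resp. f(x+x+2, y)) descends forever and A raises RecursionError.
def Pre_f (x : Int) (y : Int) : Prop := 0 ≤ x ∨ y < x ∨ x = y
instance (x : Int) (y : Int) : Decidable (Pre_f x y) := by unfold Pre_f; infer_instance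
def pvWitness_f : Int × Int := (0, 10)

def Spec_f (x : Int) (y : Int) (out : Int) : Prop := out = f_alt x y
instance (x : Int) (y : Int) (out : Int) : Decidable (Spec_f x y out) := by unfold Spec_f; infer_instance

-- ===== CLAIM (what is proved, stated in full; the proofs are below) =====
def Claim_equal_f : Prop := ∀ (x : Int) (y : Int), Dom_f x y → Pre_f x y → Spec_f x y (f x y)

-- ===== LEMMAS AND PROOFS =====

theorem fAux_succ (n : Nat) (x y : Int) :
    fAux (n + 1) x y =
      if x > y ∨ x = 21 then 0
      else if x = y then 1
      else if PySem.Int.mod x 2 = 0 then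
        fAux n (x + 1) y + fAux n (x + 4) y + fAux n (x + x + 2) y
      else
        fAux n (x + 1) y + fAux n (x + 4) y + fAux n (x + x + 1) y := rfl

-- Fuel irrelevance: any fuel beyond (y - x).toNat gives the same value (for 0 ≤ x).
theorem fAux_fuel (n : Nat) : ∀ (m : Nat) (x y : Int), 0 ≤ x →
    (y - x).toNat < n → (y - x).toNat < m → fAux n x y = fAux m x y := by
  induction n with
  | zero => intro m x y _ h _; omega
  | succ n ih =>
    intro m x y hx hn hm
    match m, hm with
    | m + 1, hm =>
      rw [fAux_succ, fAux_succ]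
      by_cases h1 : x > y ∨ x = 21
      · simp [h1]
      · simp only [if_neg h1]
        by_cases h2 : x = y
        · simp [h2]
        · simp only [if_neg h2]
          have hxy : x < y := by
            rcases not_or.mp h1 with ⟨h1a, _⟩; omega
          have key : ∀ x' : Int, x < x' → fAux n x' y = fAux m x' y := by
            intro x' hx'
            exact ih m x' y (by omega) (by omega) (by omega)
          rw [key (x+1) (by omega), key (x+4) (by omega),
              key (x+x+2) (by omega), key (x+x+1) (by omega)]

theorem f_eq_fAux (n : Nat) (x y : Int) (hx : 0 ≤ x) (hn : (y - x).toNat < n) :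
    f x y = fAux n x y := by
  unfold f
  rw [if_pos hx]
  exact fAux_fuel _ n x y hx (by omega) hn

-- the three defining equations of f
theorem f_base (x y : Int) (h : x > y ∨ x = 21) : f x y = 0 := by
  unfold f
  split_ifs with hx
  · rw [fAux_succ, if_pos h]
  · show fAux (0 + 1) x y = 0
    rw [fAux_succ, if_pos h]

theorem f_eq_self (x y : Int) (h1 : ¬(x > y ∨ x = 21)) (h2 : x = y) : f x y = 1 := by
  unfold f
  split_ifs with hx
  · rw [fAux_succ, if_neg h1, if_pos h2]
  · show fAux (0 + 1) x y = 1
    rw [fAux_succ, if_neg h1, if_pos h2]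

theorem f_step (x y : Int) (hx : 0 ≤ x) (h1 : ¬(x > y ∨ x = 21)) (h2 : x ≠ y) :
    f x y = f (x + 1) y + f (x + 4) y +
      (if PySem.Int.mod x 2 = 0 then f (x + x + 2) y else f (x + x + 1) y) := by
  have hxy : x < y := by rcases not_or.mp h1 with ⟨h1a, _⟩; omega
  have hk : (y - x).toNat = (y - (x+1)).toNat + 1 := by omega
  rw [f_eq_fAux ((y - (x+1)).toNat + 1 + 1) x y hx (by omega), fAux_succ, if_neg h1, if_neg h2]
  set n := (y - (x+1)).toNat + 1 with hn
  have e1 : fAux n (x + 1) y = f (x + 1) y :=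
    (f_eq_fAux n (x+1) y (by omega) (by omega)).symm
  have e2 : fAux n (x + 4) y = f (x + 4) y :=
    (f_eq_fAux n (x+4) y (by omega) (by omega)).symm
  have e3 : fAux n (x + x + 2) y = f (x + x + 2) y :=
    (f_eq_fAux n (x+x+2) y (by omega) (by omega)).symm
  have e4 : fAux n (x + x + 1) y = f (x + x + 1) y :=
    (f_eq_fAux n (x+x+1) y (by omega) (by omega)).symm
  by_cases hpar : PySem.Int.mod x 2 = 0
  · rw [if_pos hpar, if_pos hpar, e1, e2, e3]
  · rw [if_neg hpar, if_neg hpar, e1, e2, e4]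

theorem getD_push_lt (a : Array Int) (x d : Int) (i : Nat) (h : i < a.size) :
    (a.push x).getD i d = a.getD i d := by
  simp [Array.getD, h, Nat.lt_succ_of_lt h, Array.getElem_push_lt]

theorem getD_push_size (a : Array Int) (x d : Int) :
    (a.push x).getD a.size d = x := by
  simp [Array.getD]

-- Fold invariant: after processing v, v-1, …, x the array holds f w y at index y - w.
theorem fold_inv (y : Int) : ∀ (k : Nat) (v x : Int) (dp : Array Int),
    0 ≤ x → x - 1 ≤ v → v ≤ y → k = (v - (x - 1)).toNat →
    dp.size = (y - v).toNat →
    (∀ w : Int, v < w → w ≤ y → dp.getD (y - w).toNat 0 = f w y) →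
    (∀ w : Int, x - 1 < w → w ≤ y →
      ((PySem.List.pyRange v (x - 1) (-1)).foldl (fBStep y) dp).getD (y - w).toNat 0 = f w y) := by
  intro k
  induction k with
  | zero =>
    intro v x dp hx hvl hvy hk hsz hinv w hw hwy
    have hv : v = x - 1 := by omega
    rw [hv, PySem.List.pyRange_neg_one_eq_nil (by omega)]
    exact hinv w (by omega) hwy
  | succ k ih =>
    intro v x dp hx hvl hvy hk hsz hinv w hw hwy
    have hvgt : x - 1 < v := by omega
    rw [PySem.List.pyRange_neg_one_cons hvgt]
    simp only [List.foldl_cons]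
    have hsz' : (fBStep y dp v).size = (y - (v - 1)).toNat := by
      unfold fBStep
      split_ifs <;> simp [Array.size_push] <;> omega
    refine ih (v - 1) x (fBStep y dp v) hx (by omega) (by omega) (by omega) hsz' ?_ w hw hwy
    intro w hw' hwy'
    by_cases hwv : w = v
    · -- the entry just pushed, at index dp.size
      subst hwv
      have hidx : (y - w).toNat = dp.size := by omega
      unfold fBStep
      by_cases h21 : w = 21
      · rw [if_pos h21, hidx, getD_push_size]
        exact (f_base w y (Or.inr h21)).symm
      · rw [if_neg h21]
        by_cases hwyE : w = y
        · rw [if_pos hwyE, hidx, getD_push_size]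
          exact (f_eq_self w y (by omega) hwyE).symm
        · rw [if_neg hwyE]
          have hw0 : 0 ≤ w := by omega
          have hwlt : w < y := by omega
          simp only [hidx, getD_push_size]
          rw [f_step w y hw0 (by omega) hwyE]
          have q1 : dp.getD (y - (w + 1)).toNat 0 = f (w + 1) y :=
            hinv (w + 1) (by omega) (by omega)
          have r1 : (y - w - 1).toNat = (y - (w + 1)).toNat := by omega
      -- second summand
          by_cases h4 : w + 4 ≤ y
          · rw [if_pos h4]
            have q2 : dp.getD (y - w - 4).toNat 0 = f (w + 4) y := by
              rw [show (y - w - 4).toNat = (y - (w + 4)).toNat from by omega]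
              exact hinv (w + 4) (by omega) h4
            by_cases hpar : PySem.Int.mod w 2 = 0
            · rw [if_pos hpar, if_pos hpar]
              by_cases ht : w + w + 2 ≤ y
              · rw [if_pos ht, r1, q1, q2,
                    show (y - (w + w + 2)).toNat = (y - (w + w + 2)).toNat from rfl]
                rw [hinv (w + w + 2) (by omega) ht]
              · rw [if_neg ht, r1, q1, q2, f_base (w + w + 2) y (Or.inl (by omega))]; ring
            · rw [if_neg hpar, if_neg hpar]
              by_cases ht : w + w + 1 ≤ y
              · rw [if_pos ht, r1, q1, q2, hinv (w + w + 1) (by omega) ht]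
              · rw [if_neg ht, r1, q1, q2, f_base (w + w + 1) y (Or.inl (by omega))]; ring
          · rw [if_neg h4, f_base (w + 4) y (Or.inl (by omega))]
            by_cases hpar : PySem.Int.mod w 2 = 0
            · rw [if_pos hpar, if_pos hpar]
              by_cases ht : w + w + 2 ≤ y
              · rw [if_pos ht, r1, q1, hinv (w + w + 2) (by omega) ht]; ring
              · rw [if_neg ht, r1, q1, f_base (w + w + 2) y (Or.inl (by omega))]; ring
            · rw [if_neg hpar, if_neg hpar]
              by_cases ht : w + w + 1 ≤ y
              · rw [if_pos ht, r1, q1, hinv (w + w + 1) (by omega) ht]; ring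
              · rw [if_neg ht, r1, q1, f_base (w + w + 1) y (Or.inl (by omega))]; ring
    · -- an older entry, index < dp.size: push does not change it
      have hvw : v < w := by omega
      have hidx : (y - w).toNat < dp.size := by omega
      have hpush : ∀ c : Int, (dp.push c).getD (y - w).toNat 0 = dp.getD (y - w).toNat 0 :=
        fun c => getD_push_lt dp c 0 _ hidx
      unfold fBStep
      split_ifs <;> rw [hpush] <;> exact hinv w hvw hwy'

-- ===== VERDICT (by name: the statement is the Claim_ definition above) =====
theorem f_spec : Claim_equal_f := by
  intro x y _ hpre
  unfold Spec_f f_alt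
  by_cases h1 : x > y ∨ x = 21
  · rw [if_pos h1]
    exact f_base x y h1
  · rw [if_neg h1]
    by_cases h2 : x = y
    · rw [if_pos h2]
      exact f_eq_self x y h1 h2
    · rw [if_neg h2]
      have hx : 0 ≤ x := by
        rcases hpre with h | h | h
        · exact h
        · exact absurd (Or.inl (by omega)) h1
        · exact absurd h h2
      have hxy : x < y := by rcases not_or.mp h1 with ⟨ha, _⟩; omega
      exact (fold_inv y (y - (x - 1)).toNat y x #[] hx (by omega) le_rfl rfl
        (by simp) (by intro w hw hwy; omega) x (by omega) (by omega)).symm
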